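-- pv_equiv track=rewrite | github.com/rubelw/OSSS | src/OSSS/ai/agents/query_data/handlers/person_contacts_handler.py | _select_person_contacts_fields
-- ===== SOURCE A (Python) =====
-- from typing import Any, Dict, List, Sequence
--
-- def _select_person_contacts_fields(rows: Sequence[Dict[str, Any]]) -> List[str]:
--     if not rows:
--         return []
--
--     preferred_order = [
--         "id",
--         "person_id",
--         "person_code",
--         "contact_type",
--         "contact_value",
--         "preferred",
--         "status",
--         "created_at",
--         "updated_at",
--     ]
--
--     all_keys: List[str] = []
--     for r in rows:
--         for k in r.keys():
--             if k not in all_keys: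
--                 all_keys.append(k)
--
--     ordered: List[str] = [c for c in preferred_order if c in all_keys]
--     ordered.extend(c for c in all_keys if c not in ordered)
--     return ordered
-- ===== SOURCE B (Python) =====
-- from typing import Any, Dict, List, Sequence
--
-- def _select_person_contacts_fields(rows: Sequence[Dict[str, Any]]) -> List[str]:
--     if not rows:
--         return []
--
--     preferred_order = [
--         "id",
--         "person_id",
--         "person_code",
--         "contact_type",
--         "contact_value",
--         "preferred",
--         "status",
--         "created_at",
--         "updated_at",
--     ]
--
--     # map each distinct key to its first-seen index
--     first_seen: Dict[str, int] = {}
--     for r in rows: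
--         for k in r:
--             if k not in first_seen:
--                 first_seen[k] = len(first_seen)
--
--     pref_index = {k: i for i, k in enumerate(preferred_order)}
--     n = len(preferred_order)
--     # preferred keys rank by their preferred position (< n), all others after, by first-seen index
--     return sorted(first_seen, key=lambda k: pref_index.get(k, n + first_seen[k]))
-- ===== Notes on version B (the rewrite author's own statement) =====
-- stated objective: faster
-- what changed: Replaces A's quadratic collect-then-partition (list membership scans, then two filter passes over the collected keys) with a first-seen-index dict built in one pass plus a single stable sort under a rank key (preferred position, else n + first-seen index).
import Mathlib
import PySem

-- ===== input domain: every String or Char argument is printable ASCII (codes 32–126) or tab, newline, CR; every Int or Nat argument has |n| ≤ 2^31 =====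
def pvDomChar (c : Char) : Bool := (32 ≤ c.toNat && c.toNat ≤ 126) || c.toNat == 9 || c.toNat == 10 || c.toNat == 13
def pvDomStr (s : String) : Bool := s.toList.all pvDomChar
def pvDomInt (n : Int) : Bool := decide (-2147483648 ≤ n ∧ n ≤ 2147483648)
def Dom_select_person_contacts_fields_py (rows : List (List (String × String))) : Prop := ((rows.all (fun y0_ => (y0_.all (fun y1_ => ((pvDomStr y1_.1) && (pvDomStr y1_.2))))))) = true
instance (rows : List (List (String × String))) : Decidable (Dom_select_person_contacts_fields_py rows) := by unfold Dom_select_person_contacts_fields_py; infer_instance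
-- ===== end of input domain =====

-- B replaces A's quadratic collect-then-partition passes with a first-seen-index dict and one stable sort under a rank key (measured faster in a timing run).

-- ===== PORT A =====
def pvPreferred : List String :=
  ["id","person_id","person_code","contact_type","contact_value","preferred","status","created_at","updated_at"]

-- 'if k not in all_keys: all_keys.append(k)' (iterating a row dict's keys; the dedup check makes
-- iterating the raw pairs' first components give exactly the dict's key iteration order)
def pvAllKeysStep (acc : List String) (kv : String × String) : List String :=
  if acc.contains kv.1 then acc else acc ++ [kv.1]

def select_person_contacts_fields_py (rows : List (List (String × String))) : List String :=
  if rows.isEmpty then [] else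
    let all_keys := rows.foldl (fun acc r => r.foldl pvAllKeysStep acc) []
    let ordered := pvPreferred.filter (fun c => all_keys.contains c)
    ordered ++ all_keys.filter (fun c => !(ordered.contains c))

-- ===== PORT B =====
-- 'if k not in first_seen: first_seen[k] = len(first_seen)'
def pvFirstSeenStep (d : PySem.Dict String Int) (kv : String × String) : PySem.Dict String Int :=
  if d.contains kv.1 then d else d.insert kv.1 (d.size : Int)

-- pref_index = {k: i for i, k in enumerate(preferred_order)}
def pvPrefIdx : PySem.Dict String Int :=
  PySem.Dict.ofList (pvPreferred.zipIdx.map (fun p => (p.1, (p.2 : Int))))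

def select_person_contacts_fields_py_alt (rows : List (List (String × String))) : List String :=
  if rows.isEmpty then [] else
    let fs := rows.foldl (fun d r => r.foldl pvFirstSeenStep d) PySem.Dict.empty
    let n : Int := pvPreferred.length
    PySem.List.sorted fs.keys (fun k => pvPrefIdx.getD k (n + fs.getD k 0)) false

-- ===== PRECONDITION & SPEC =====
def Spec_select_person_contacts_fields_py (rows : List (List (String × String))) (out : List String) : Prop := out = select_person_contacts_fields_py_alt rows
instance (rows : List (List (String × String))) (out : List String) : Decidable (Spec_select_person_contacts_fields_py rows out) := by unfold Spec_select_person_contacts_fields_py; infer_instance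

-- ===== CLAIM (what is proved, stated in full; the proofs are below) =====
def Claim_equal_select_person_contacts_fields_py : Prop := ∀ (rows : List (List (String × String))), Dom_select_person_contacts_fields_py rows → Spec_select_person_contacts_fields_py rows (select_person_contacts_fields_py rows)

-- ===== LEMMAS AND PROOFS =====

def pvInv (d : PySem.Dict String Int) : Prop :=
  d.keys.Nodup ∧ d.values = (List.range d.size).map (fun i => (Int.ofNat i))

theorem pvStep_keys_inv (d : PySem.Dict String Int) (kv : String × String) (h : pvInv d) :
    (pvFirstSeenStep d kv).keys = pvAllKeysStep d.keys kv ∧ pvInv (pvFirstSeenStep d kv) := by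
  obtain ⟨hnd, hv⟩ := h
  unfold pvFirstSeenStep pvAllKeysStep
  rw [PySem.Dict.contains_eq_decide_mem_keys, List.contains_eq_mem]
  by_cases hc : kv.1 ∈ d.keys
  · have ht : decide (kv.1 ∈ d.keys) = true := by simp [hc]
    rw [if_pos ht, if_pos ht]
    exact ⟨rfl, hnd, hv⟩
  · have hf : ¬(decide (kv.1 ∈ d.keys) = true) := by simp [hc]
    rw [if_neg hf, if_neg hf]
    have hcf : d.contains kv.1 = false := by
      rw [PySem.Dict.contains_eq_decide_mem_keys]; simp [hc]
    have hit := PySem.Dict.items_insert_of_not_contains d ((d.size : Int)) hcf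
    refine ⟨PySem.Dict.keys_insert_of_not_contains d _ hcf, ?_, ?_⟩
    · exact PySem.Dict.nodup_keys_insert d _ _ hnd
    · have hsz : (d.insert kv.1 (d.size : Int)).size = d.size + 1 := by
        show (d.insert kv.1 (d.size : Int)).items.length = d.items.length + 1
        rw [hit]; simp
      have hvals : (d.insert kv.1 (d.size : Int)).values = d.values ++ [(d.size : Int)] := by
        show (d.insert kv.1 (d.size : Int)).items.map Prod.snd = d.items.map Prod.snd ++ [(d.size : Int)]
        rw [hit]; simp
      rw [hvals, hsz, hv, List.range_succ]
      simp

theorem pvFoldInner (r : List (String × String)) (d : PySem.Dict String Int) (h : pvInv d) :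
    (r.foldl pvFirstSeenStep d).keys = r.foldl pvAllKeysStep d.keys ∧ pvInv (r.foldl pvFirstSeenStep d) := by
  induction r generalizing d with
  | nil => exact ⟨rfl, h⟩
  | cons kv r ih =>
    simp only [List.foldl_cons]
    obtain ⟨hk, hi⟩ := pvStep_keys_inv d kv h
    obtain ⟨hk2, hi2⟩ := ih _ hi
    exact ⟨by rw [hk2, hk], hi2⟩

theorem pvFoldOuter (rows : List (List (String × String))) (d : PySem.Dict String Int) (h : pvInv d) :
    (rows.foldl (fun d r => r.foldl pvFirstSeenStep d) d).keys
      = rows.foldl (fun acc r => r.foldl pvAllKeysStep acc) d.keys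
    ∧ pvInv (rows.foldl (fun d r => r.foldl pvFirstSeenStep d) d) := by
  induction rows generalizing d with
  | nil => exact ⟨rfl, h⟩
  | cons r rows ih =>
    simp only [List.foldl_cons]
    obtain ⟨hk, hi⟩ := pvFoldInner r d h
    obtain ⟨hk2, hi2⟩ := ih _ hi
    exact ⟨by rw [hk2, hk], hi2⟩

theorem pvInv_empty : pvInv (PySem.Dict.empty : PySem.Dict String Int) := by
  constructor <;> decide

theorem pvFold_keys_inv (rows : List (List (String × String))) :
    (rows.foldl (fun d r => r.foldl pvFirstSeenStep d) PySem.Dict.empty).keys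
      = rows.foldl (fun acc r => r.foldl pvAllKeysStep acc) []
    ∧ pvInv (rows.foldl (fun d r => r.foldl pvFirstSeenStep d) PySem.Dict.empty) :=
  pvFoldOuter rows PySem.Dict.empty pvInv_empty


theorem pvPrefIdx_keys : pvPrefIdx.keys = pvPreferred := by decide

theorem pvPref_get?_none (k : String) (hk : k ∉ pvPreferred) : pvPrefIdx.get? k = none := by
  rw [PySem.Dict.get?_eq_none_iff_not_mem_keys, pvPrefIdx_keys]; exact hk

theorem pvPref_getD (k : String) (i : Int) (h : pvPrefIdx.get? k = some i) (fb : Int) :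
    pvPrefIdx.getD k fb = i := by
  rw [PySem.Dict.getD_eq_get?_getD, h]; rfl

theorem pvPref_map_key (f : String → Int) :
    pvPreferred.map (fun k => pvPrefIdx.getD k (f k)) = [0,1,2,3,4,5,6,7,8] := by
  simp only [pvPreferred, List.map_cons, List.map_nil]
  refine List.ext_getElem (by simp) ?_
  intro n h1 h2
  simp only [List.length_cons, List.length_nil] at h2
  interval_cases n <;>
    simp only [List.getElem_cons_zero, List.getElem_cons_succ] <;>
    exact pvPref_getD _ _ (by decide) _

theorem pvSorted_eq (fs : PySem.Dict String Int) (h : pvInv fs) :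
    PySem.List.sorted fs.keys
        (fun k => pvPrefIdx.getD k ((pvPreferred.length : Int) + fs.getD k 0)) false
      = pvPreferred.filter (fun c => fs.keys.contains c)
        ++ fs.keys.filter (fun c => !((pvPreferred.filter (fun c => fs.keys.contains c)).contains c)) := by
  obtain ⟨hnd, hv⟩ := h
  have hvals : fs.items.map Prod.snd = (List.range fs.items.length).map (fun i => (Int.ofNat i)) := hv
  have hpairItems : fs.items.Pairwise (fun p q => p.2 < q.2) := by
    have h1 : (fs.items.map Prod.snd).Pairwise (fun a b => a < b) := by
      rw [hvals]
      exact List.Pairwise.map _ (fun a b hb => Int.ofNat_lt.mpr hb) List.pairwise_lt_range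
    exact List.pairwise_map.mp h1
  have hgetD : ∀ p ∈ fs.items, fs.getD p.1 0 = p.2 := by
    intro p hp
    exact PySem.Dict.getD_of_mem_items fs hp hnd 0
  have hkeq : fs.keys = fs.items.map Prod.fst := rfl
  have hpairKeys : fs.keys.Pairwise (fun a b => fs.getD a 0 < fs.getD b 0) := by
    rw [hkeq]
    refine List.pairwise_map.mpr ?_
    exact List.Pairwise.imp_of_mem (fun {p q} hp hq hr => by rw [hgetD p hp, hgetD q hq]; exact hr) hpairItems
  have hnonneg : ∀ k ∈ fs.keys, 0 ≤ fs.getD k 0 := by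
    intro k hk
    rw [hkeq] at hk
    obtain ⟨p, hp, rfl⟩ := List.mem_map.mp hk
    rw [hgetD p hp]
    have h2 : p.2 ∈ fs.items.map Prod.snd := List.mem_map_of_mem hp
    rw [hvals] at h2
    obtain ⟨i, _, hi⟩ := List.mem_map.mp h2
    simp [← hi]
  have hlen : (pvPreferred.length : Int) = 9 := by decide
  have hmap := pvPref_map_key (fun k => (pvPreferred.length : Int) + fs.getD k 0)
  have hkeylow : ∀ a ∈ pvPreferred,
      pvPrefIdx.getD a ((pvPreferred.length : Int) + fs.getD a 0) < 9 := by
    intro a ha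
    have h2 := List.mem_map_of_mem (l := pvPreferred) (f := fun k => pvPrefIdx.getD k ((pvPreferred.length : Int) + fs.getD k 0)) ha
    rw [hmap] at h2
    simp only [List.mem_cons, List.not_mem_nil, or_false] at h2
    rcases h2 with h2|h2|h2|h2|h2|h2|h2|h2|h2 <;> rw [h2] <;> norm_num
  have hkeyhighEq : ∀ b, b ∉ pvPreferred →
      pvPrefIdx.getD b ((pvPreferred.length : Int) + fs.getD b 0) = 9 + fs.getD b 0 := by
    intro b hnb
    rw [PySem.Dict.getD_eq_get?_getD, pvPref_get?_none b hnb, hlen]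
    rfl
  have hprefPair : pvPreferred.Pairwise
      (fun a b => pvPrefIdx.getD a ((pvPreferred.length : Int) + fs.getD a 0)
        < pvPrefIdx.getD b ((pvPreferred.length : Int) + fs.getD b 0)) := by
    refine List.pairwise_map.mp ?_
    rw [hmap]; decide
  have hPpair := List.Pairwise.sublist (List.filter_sublist (p := fun c => fs.keys.contains c) (l := pvPreferred)) hprefPair
  have hmemN : ∀ x ∈ fs.keys.filter
      (fun c => !((pvPreferred.filter (fun c => fs.keys.contains c)).contains c)),
      x ∈ fs.keys ∧ x ∉ pvPreferred := by
    intro x hx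
    obtain ⟨hxk, hxo⟩ := List.mem_filter.mp hx
    refine ⟨hxk, fun hxp => ?_⟩
    simp [List.contains_eq_mem, List.mem_filter, hxp, hxk] at hxo
  have hNpair : (fs.keys.filter
      (fun c => !((pvPreferred.filter (fun c => fs.keys.contains c)).contains c))).Pairwise
      (fun a b => pvPrefIdx.getD a ((pvPreferred.length : Int) + fs.getD a 0)
        < pvPrefIdx.getD b ((pvPreferred.length : Int) + fs.getD b 0)) := by
    have base := List.Pairwise.sublist (List.filter_sublist (p := fun c => !((pvPreferred.filter (fun c => fs.keys.contains c)).contains c)) (l := fs.keys)) hpairKeys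
    refine List.Pairwise.imp_of_mem (fun {a b} ha hb hr => ?_) base
    rw [hkeyhighEq a (hmemN a ha).2, hkeyhighEq b (hmemN b hb).2]
    omega
  have hcross : ∀ a ∈ pvPreferred.filter (fun c => fs.keys.contains c),
      ∀ b ∈ fs.keys.filter
        (fun c => !((pvPreferred.filter (fun c => fs.keys.contains c)).contains c)),
      pvPrefIdx.getD a ((pvPreferred.length : Int) + fs.getD a 0)
        < pvPrefIdx.getD b ((pvPreferred.length : Int) + fs.getD b 0) := by
    intro a ha b hb
    have hla := hkeylow a (List.mem_filter.mp ha).1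
    obtain ⟨hbk, hbp⟩ := hmemN b hb
    have := hnonneg b hbk
    rw [hkeyhighEq b hbp]
    omega
  have hpair := List.pairwise_append.mpr ⟨hPpair, hNpair, hcross⟩
  have hPnd : (pvPreferred.filter (fun c => fs.keys.contains c)).Nodup :=
    List.Nodup.filter _ (by decide)
  have hNeq : fs.keys.filter
      (fun c => !((pvPreferred.filter (fun c => fs.keys.contains c)).contains c))
      = fs.keys.filter (fun c => !(pvPreferred.contains c)) := by
    refine List.filter_congr (fun x hx => ?_)
    simp [List.contains_eq_mem, List.mem_filter, hx]
  have hPperm : (pvPreferred.filter (fun c => fs.keys.contains c)).Perm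
      (fs.keys.filter (fun c => pvPreferred.contains c)) :=
    (List.perm_ext_iff_of_nodup hPnd (List.Nodup.filter _ hnd)).mpr
      (fun x => by simp [List.mem_filter, List.contains_eq_mem, and_comm])
  have hperm : (pvPreferred.filter (fun c => fs.keys.contains c)
      ++ fs.keys.filter
        (fun c => !((pvPreferred.filter (fun c => fs.keys.contains c)).contains c))).Perm fs.keys := by
    rw [hNeq]
    exact (hPperm.append_right _).trans (List.filter_append_perm _ _)
  exact PySem.List.sorted_eq_of_perm_of_pairwise_lt _ _ _ hperm hpair

-- ===== VERDICT (by name: the statement is the Claim_ definition above) =====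
theorem select_person_contacts_fields_py_spec : Claim_equal_select_person_contacts_fields_py := by
  intro rows _
  unfold Spec_select_person_contacts_fields_py
  unfold select_person_contacts_fields_py select_person_contacts_fields_py_alt
  by_cases he : rows.isEmpty
  · simp [he]
  · rw [if_neg he, if_neg he]
    obtain ⟨hk, hinv⟩ := pvFold_keys_inv rows
    simp only [← hk]
    exact (pvSorted_eq _ hinv).symm
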